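-- pv_equiv track=rewrite | github.com/tobiasw225/python-aes | src/utils.py | reshape_blocks
-- ===== SOURCE A (Python) =====
-- from typing import Iterable, List, Union, Any
--
-- def reshape_blocks(blocks: list, block_size: int = 16) -> List:
--     """
--         reshape blocks from simple list
--         to list of lists and add a default-value
--         (whitespace : 32)
--
--     :param blocks:
--     :param block_size:
--     :return:
--     """
--     start = 0
--     while len(row := blocks[start : start + block_size]) == block_size:
--         yield row
--         start += block_size
--     # last row might not be full
--     last_row = [32] * block_size
--     for i in range(len(row)):
--         last_row[i] = row[i]
--     yield last_row
-- ===== SOURCE B (Python) =====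
-- from typing import List
--
--
-- def reshape_blocks(blocks: list, block_size: int = 16) -> List:
--     """Streaming re-implementation: consume elements one by one into a row,
--     flush each full row, then always emit a final padded row."""
--     row = []
--     for x in blocks:
--         row.append(x)
--         if len(row) == block_size:
--             yield row
--             row = []
--     last_row = [32] * block_size
--     for i in range(len(row)):
--         last_row[i] = row[i]
--     yield last_row
-- ===== Notes on version B (the rewrite author's own statement) =====
-- stated objective: alternative
-- what changed: Replaces repeated index-slicing (blocks[start:start+block_size] each iteration) with a single streaming pass that accumulates a current row element by element and flushes it when full.
-- outside the precondition, e.g. on reshape_blocks([1], -2): A returns [[]], B raises IndexError; on reshape_blocks([1, 2], -1): A raises IndexError, B raises IndexError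
import Mathlib
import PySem

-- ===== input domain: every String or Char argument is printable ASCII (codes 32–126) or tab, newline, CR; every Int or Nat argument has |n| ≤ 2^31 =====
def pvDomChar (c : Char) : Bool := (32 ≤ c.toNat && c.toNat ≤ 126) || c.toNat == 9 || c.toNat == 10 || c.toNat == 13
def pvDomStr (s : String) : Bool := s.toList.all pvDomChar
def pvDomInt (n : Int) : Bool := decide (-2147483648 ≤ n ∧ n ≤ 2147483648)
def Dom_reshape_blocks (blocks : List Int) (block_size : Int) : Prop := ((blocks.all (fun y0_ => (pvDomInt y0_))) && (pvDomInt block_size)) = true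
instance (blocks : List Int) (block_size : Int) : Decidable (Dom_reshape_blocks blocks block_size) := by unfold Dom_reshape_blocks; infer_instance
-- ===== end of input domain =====

-- B replaces A's repeated index slicing with a single streaming pass that accumulates
-- a row element by element and flushes it when full (alternative decomposition, same cost).
-- Both Pythons are generators; equivalence is about the list of yielded values.

-- ===== PORT A =====
-- the trailing-pad step shared verbatim by both Python functions:
-- last_row = [32] * block_size; for i in range(len(row)): last_row[i] = row[i]
def pvPadRow (block_size : Int) (row : List Int) : List Int :=
  (List.range row.length).foldl (fun lr i => lr.set i (row.getD i 0))
    (List.replicate block_size.toNat 32)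

-- the while loop of A; fuel is a totality guard only (never exhausted when block_size ≥ 1)
def reshapeA_loop (blocks : List Int) (block_size : Int) (start : Int) (fuel : Nat) :
    List (List Int) × List Int :=
  match fuel with
  | 0 => ([], PySem.List.slice blocks (some start) (some (start + block_size)))
  | fuel + 1 =>
    let row := PySem.List.slice blocks (some start) (some (start + block_size))
    if (row.length : Int) = block_size then
      let r := reshapeA_loop blocks block_size (start + block_size) fuel
      (row :: r.1, r.2)
    else ([], row)

def reshape_blocks (blocks : List Int) (block_size : Int) : List (List Int) :=
  let r := reshapeA_loop blocks block_size 0 (blocks.length + 1)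
  r.1 ++ [pvPadRow block_size r.2]

-- ===== PORT B =====
def reshapeB_loop (block_size : Int) : List Int → List Int → List (List Int) × List Int
  | row, [] => ([], row)
  | row, x :: xs =>
    let row' := row ++ [x]
    if (row'.length : Int) = block_size then
      let r := reshapeB_loop block_size [] xs
      (row' :: r.1, r.2)
    else reshapeB_loop block_size row' xs

def reshape_blocks_alt (blocks : List Int) (block_size : Int) : List (List Int) :=
  let r := reshapeB_loop block_size [] blocks
  r.1 ++ [pvPadRow block_size r.2]

-- ===== PRECONDITION & SPEC =====
-- Pre_ excludes block_size ≤ 0: A loops forever on block_size = 0, and on negative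
-- block_size A either raises IndexError or yields one accidental empty block, while
-- B's accumulator never flushes and raises IndexError on any nonempty input.
def Pre_reshape_blocks (_blocks : List Int) (block_size : Int) : Prop := 1 ≤ block_size
instance (blocks : List Int) (block_size : Int) : Decidable (Pre_reshape_blocks blocks block_size) := by unfold Pre_reshape_blocks; infer_instance

def pvWitness_reshape_blocks : List Int × Int := ([1, 2, 3], 2)

def Spec_reshape_blocks (blocks : List Int) (block_size : Int) (out : List (List Int)) : Prop := out = reshape_blocks_alt blocks block_size
instance (blocks : List Int) (block_size : Int) (out : List (List Int)) : Decidable (Spec_reshape_blocks blocks block_size out) := by unfold Spec_reshape_blocks; infer_instance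

-- ===== CLAIM (what is proved, stated in full; the proofs are below) =====
def Claim_equal_reshape_blocks : Prop := ∀ (blocks : List Int) (block_size : Int), Dom_reshape_blocks blocks block_size → Pre_reshape_blocks blocks block_size → Spec_reshape_blocks blocks block_size (reshape_blocks blocks block_size)

-- ===== LEMMAS AND PROOFS =====

-- reference chunking: both loops compute this (full chunks, leftover remainder)
def pvChunks (bs : Nat) (l : List Int) : List (List Int) × List Int :=
  if _h : 1 ≤ bs ∧ bs ≤ l.length then
    let r := pvChunks bs (l.drop bs)
    (l.take bs :: r.1, r.2)
  else ([], l)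
termination_by l.length
decreasing_by simp; omega

theorem reshapeB_loop_eq_chunks (n : Nat) (hn : 1 ≤ n) :
    ∀ (l acc : List Int), acc.length < n →
      reshapeB_loop (n : Int) acc l = pvChunks n (acc ++ l) := by
  intro l
  induction l with
  | nil =>
    intro acc hacc
    rw [pvChunks]
    rw [dif_neg (by simp; omega)]
    simp [reshapeB_loop]
  | cons x xs ih =>
    intro acc hacc
    by_cases h : acc.length + 1 = n
    · have hlen : (acc ++ [x]).length = n := by simp; omega
      have hcond : ((acc ++ [x]).length : Int) = (n : Int) := by rw [hlen]
      have hxs := ih [] (by simpa using hn)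
      simp only [reshapeB_loop]
      rw [if_pos hcond]
      have hsplit : acc ++ x :: xs = (acc ++ [x]) ++ xs := by simp
      rw [hsplit]
      conv_rhs => rw [pvChunks]
      rw [dif_pos ⟨hn, by simp; omega⟩]
      simp only [List.take_left' hlen, List.drop_left' hlen, hxs, List.nil_append]
    · have hcond : ¬ (((acc ++ [x]).length : Int) = (n : Int)) := by simp; omega
      simp only [reshapeB_loop]
      rw [if_neg hcond]
      rw [ih (acc ++ [x]) (by simp; omega)]
      simp

theorem reshapeA_loop_eq_chunks (blocks : List Int) (n : Nat) (hn : 1 ≤ n) :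
    ∀ (fuel : Nat) (s : Nat), blocks.length - s < fuel →
      reshapeA_loop blocks (n : Int) (s : Int) fuel = pvChunks n (blocks.drop s) := by
  intro fuel
  induction fuel with
  | zero => intro s hs; omega
  | succ fuel ih =>
    intro s hfuel
    have hslice : PySem.List.slice blocks (some (s : Int)) (some ((s : Int) + (n : Int)))
        = (blocks.drop s).take n := PySem.List.slice_natCast_add blocks s n
    have hdlen : (blocks.drop s).length = blocks.length - s := List.length_drop
    simp only [reshapeA_loop, hslice]
    by_cases h : n ≤ (blocks.drop s).length
    · have htake : ((blocks.drop s).take n).length = n := by simp; omega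
      have hcond : (((blocks.drop s).take n).length : Int) = (n : Int) := by rw [htake]
      rw [if_pos hcond]
      have hcast : (s : Int) + (n : Int) = ((s + n : Nat) : Int) := by push_cast; ring
      rw [hcast, ih (s + n) (by omega)]
      conv_rhs => rw [pvChunks]
      rw [dif_pos ⟨hn, h⟩]
      have hdrop : (blocks.drop s).drop n = blocks.drop (s + n) := by
        rw [List.drop_drop]
      simp only [hdrop]
    · have hlt : (blocks.drop s).length < n := by omega
      have htake : (blocks.drop s).take n = blocks.drop s :=
        List.take_of_length_le (by omega)
      have hcond : ¬ ((((blocks.drop s).take n).length : Int) = (n : Int)) := by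
        rw [htake]; simp; omega
      rw [if_neg hcond]
      rw [pvChunks, dif_neg (by omega)]
      rw [htake]

theorem loops_agree (blocks : List Int) (n : Nat) (hn : 1 ≤ n) :
    reshapeA_loop blocks (n : Int) 0 (blocks.length + 1)
      = reshapeB_loop (n : Int) [] blocks := by
  have hA := reshapeA_loop_eq_chunks blocks n hn (blocks.length + 1) 0 (by omega)
  have hB := reshapeB_loop_eq_chunks n hn blocks [] (by simpa using hn)
  simp at hA hB
  rw [hA, hB]

-- ===== VERDICT (by name: the statement is the Claim_ definition above) =====
theorem reshape_blocks_spec : Claim_equal_reshape_blocks := by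
  intro blocks block_size _ hpre
  unfold Spec_reshape_blocks reshape_blocks reshape_blocks_alt
  have hbs : block_size = ((block_size.toNat : Nat) : Int) := by
    unfold Pre_reshape_blocks at hpre; omega
  have hn : 1 ≤ block_size.toNat := by unfold Pre_reshape_blocks at hpre; omega
  rw [hbs, loops_agree blocks block_size.toNat hn]
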